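-- pv_equiv track=rewrite | github.com/bloodyrednose24/skateweb | test_brand_config.py | python_filter_by_company
-- ===== SOURCE A (Python) =====
-- def python_filter_by_company(products, selected_companies):
--     if not selected_companies:
--         return products
--
--     result = []
--     lower_companies = {c.lower() for c in selected_companies}
--     for p in products:
--         brand = (p.get("brand") or "").lower()
--         if any(comp in brand for comp in lower_companies):
--             result.append(p)
--     return result
-- ===== SOURCE B (Python) =====
-- def python_filter_by_company(products, selected_companies):
--     if not selected_companies:
--         return products
--     patterns = tuple(c.lower() for c in selected_companies)
--     return [p for p in products
--             if _brand_matches((p.get("brand") or "").lower(), patterns)]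
--
--
-- def _brand_matches(brand, patterns):
--     # position-major scan: at each position of the brand try every
--     # pattern as a prefix (vs A's per-pattern substring search);
--     # str.startswith with a tuple tests all patterns at once
--     return any(brand.startswith(patterns, i) for i in range(len(brand) + 1))
-- ===== Notes on version B (the rewrite author's own statement) =====
-- stated objective: alternative
-- what changed: Replaces A's per-pattern substring search over a lowered set with a single position-major scan of each brand's suffixes, testing every lowered pattern as a prefix at each position, and builds the result by filtering instead of append-accumulation.
import Mathlib
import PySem

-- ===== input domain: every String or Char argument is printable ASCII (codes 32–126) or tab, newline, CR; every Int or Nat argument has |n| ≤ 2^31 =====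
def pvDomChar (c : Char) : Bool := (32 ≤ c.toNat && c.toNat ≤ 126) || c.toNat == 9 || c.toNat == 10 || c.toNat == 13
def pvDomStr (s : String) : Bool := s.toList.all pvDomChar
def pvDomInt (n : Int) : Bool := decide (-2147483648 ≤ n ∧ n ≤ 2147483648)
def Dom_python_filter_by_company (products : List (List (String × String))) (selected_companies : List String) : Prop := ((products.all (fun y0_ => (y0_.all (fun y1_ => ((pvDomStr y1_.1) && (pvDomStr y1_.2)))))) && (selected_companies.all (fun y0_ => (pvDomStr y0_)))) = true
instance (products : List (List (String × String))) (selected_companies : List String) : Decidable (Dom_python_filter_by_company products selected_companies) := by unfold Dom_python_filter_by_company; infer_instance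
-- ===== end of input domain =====

-- B replaces A's per-pattern substring search over a lowered set by a position-major
-- scan of each brand's suffixes (every pattern tried as a prefix at each position),
-- and builds the result with filter instead of append-accumulation (objective: alternative).

-- ===== PORT A =====
def python_filter_by_company (products : List (List (String × String))) (selected_companies : List String) : List (List (String × String)) :=
  if selected_companies.isEmpty then products
  else
    -- lower_companies = {c.lower() for c in selected_companies}; brand = (p.get("brand") or "").lower()
    -- (the two Python locals are inlined; '.getD ""' is exactly the 'or ""' since lower "" = "")
    products.foldl (fun result p =>
      if (PySem.Set.ofList (selected_companies.map (fun c => PySem.Str.lower c))).any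
           (fun comp => PySem.Str.isIn comp (PySem.Str.lower (((PySem.Dict.mk p).get? "brand").getD ""))) then
        result ++ [p]
      else result) []

-- ===== PORT B =====
-- _brand_matches: for i in range(len(brand)+1): any(brand.startswith(pat, i) ...)
-- brand.startswith(pat, i) is ported as startswith (brand.drop i) pat, exact for 0 <= i <= len(brand)
def pvBrandMatches (brand : List Char) (patterns : List (List Char)) : Bool :=
  (List.range (brand.length + 1)).any (fun i =>
    patterns.any (fun pat => PySem.Chars.startswith (brand.drop i) pat))

def python_filter_by_company_alt (products : List (List (String × String))) (selected_companies : List String) : List (List (String × String)) :=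
  if selected_companies.isEmpty then products
  else
    products.filter (fun p =>
      pvBrandMatches (PySem.Chars.lower (((PySem.Dict.mk p).get? "brand").getD "").toList)
        (selected_companies.map (fun c => (PySem.Str.lower c).toList)))

-- ===== PRECONDITION & SPEC =====
def Spec_python_filter_by_company (products : List (List (String × String))) (selected_companies : List String) (out : List (List (String × String))) : Prop := out = python_filter_by_company_alt products selected_companies
instance (products : List (List (String × String))) (selected_companies : List String) (out : List (List (String × String))) : Decidable (Spec_python_filter_by_company products selected_companies out) := by unfold Spec_python_filter_by_company; infer_instance

-- ===== CLAIM (what is proved, stated in full; the proofs are below) =====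
def Claim_equal_python_filter_by_company : Prop := ∀ (products : List (List (String × String))) (selected_companies : List String), Dom_python_filter_by_company products selected_companies → Spec_python_filter_by_company products selected_companies (python_filter_by_company products selected_companies)

-- ===== LEMMAS AND PROOFS =====

-- the position scan finds a match iff some pattern occurs as a substring of the brand
theorem pvBrandMatches_iff (pats : List (List Char)) (s : List Char) :
    pvBrandMatches s pats = true ↔ ∃ pat ∈ pats, PySem.Chars.isIn pat s = true := by
  unfold pvBrandMatches
  simp only [List.any_eq_true, List.mem_range]
  constructor
  · rintro ⟨i, _, pat, hmem, hpre⟩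
    refine ⟨pat, hmem, ?_⟩
    rw [← PySem.Chars.exists_prefix_drop_iff_isIn]
    rw [PySem.Chars.startswith_iff] at hpre
    exact ⟨i, hpre⟩
  · rintro ⟨pat, hmem, hIn⟩
    obtain ⟨j, hpre⟩ := (PySem.Chars.exists_prefix_drop_iff_isIn _ _).mpr hIn
    refine ⟨min j s.length, by omega, pat, hmem, ?_⟩
    rw [PySem.Chars.startswith_iff]
    by_cases h : j ≤ s.length
    · rwa [Nat.min_eq_left h]
    · have hnil : s.drop j = [] := List.drop_eq_nil_of_le (Nat.le_of_not_le h)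
      rw [hnil] at hpre
      have hp : pat = [] := List.prefix_nil.mp hpre
      rw [hp]
      exact List.nil_prefix

-- ===== VERDICT (by name: the statement is the Claim_ definition above) =====
theorem python_filter_by_company_spec : Claim_equal_python_filter_by_company := by
  intro products selected_companies _
  unfold Spec_python_filter_by_company python_filter_by_company python_filter_by_company_alt
  by_cases hsel : selected_companies.isEmpty = true
  · rw [if_pos hsel, if_pos hsel]
  · rw [if_neg hsel, if_neg hsel]
    rw [PySem.List.foldl_append_if_eq_filter, List.nil_append]
    apply List.filter_congr
    intro p _
    apply Bool.eq_iff_iff.mpr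
    rw [List.any_eq_true, pvBrandMatches_iff]
    constructor
    · rintro ⟨comp, hmem, hIn⟩
      rw [PySem.Set.mem_ofList] at hmem
      obtain ⟨cc, hcc, rfl⟩ := List.mem_map.mp hmem
      refine ⟨(PySem.Str.lower cc).toList, List.mem_map.mpr ⟨cc, hcc, rfl⟩, ?_⟩
      rw [PySem.Str.isIn_eq] at hIn
      simpa [PySem.Str.toList_lower] using hIn
    · rintro ⟨pat, hmem, hIn⟩
      obtain ⟨cc, hcc, rfl⟩ := List.mem_map.mp hmem
      refine ⟨PySem.Str.lower cc, (PySem.Set.mem_ofList _ _).mpr (List.mem_map.mpr ⟨cc, hcc, rfl⟩), ?_⟩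
      rw [PySem.Str.isIn_eq]
      simpa [PySem.Str.toList_lower] using hIn
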